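-- pv_equiv track=rewrite | github.com/dizonPhilip/HackerRank | QueensAttackII/queens_attack_ii.py | cleanup_obstacles
-- ===== SOURCE A (Python) =====
-- def cleanup_obstacles(r_q, c_q, obstacles):
--     '''
--     Discards obstacles that are already in the same path of attack as
--     another obstacle.
--     '''
--     filtered_obstacles = {}
--     for coordinates in obstacles:
--         if is_obstacle_in_horizontal_path_of_attack(coordinates, r_q):
--             choose_horizontal_obstacle_closest_to_queen(coordinates, r_q, c_q, filtered_obstacles)
--         elif is_obstacle_in_vertical_path_of_attack(coordinates, c_q):
--             choose_vertical_obstacle_closest_to_queen(coordinates, r_q, c_q, filtered_obstacles)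
--         elif is_obstacle_in_diagonal_path_of_attack(coordinates, r_q, c_q):
--             choose_diagonal_obstacle_closest_to_queen(coordinates, r_q, c_q, filtered_obstacles)
--
--     return filtered_obstacles
--
-- def is_obstacle_in_horizontal_path_of_attack(coordinates, r_q):
--     return (coordinates[0] == r_q)
--
-- def is_obstacle_in_vertical_path_of_attack(coordinates, c_q):
--     return (coordinates[1] == c_q)
--
-- def is_obstacle_in_diagonal_path_of_attack(coordinates, r_q, c_q):
--     return abs(coordinates[0] - r_q) == abs(coordinates[1] - c_q)
--
-- def choose_horizontal_obstacle_closest_to_queen(coordinates, r_q, c_q, filtered_obstacles):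
--     if coordinates[1] < c_q:
--         try:
--             if filtered_obstacles["min_w"][1] < coordinates[1]:
--                 filtered_obstacles["min_w"] = coordinates
--         except KeyError:
--             filtered_obstacles["min_w"] = coordinates
--     elif coordinates[1] > c_q:
--         try:
--             if filtered_obstacles["min_e"][1] > coordinates[1]:
--                 filtered_obstacles["min_e"] = coordinates
--         except KeyError:
--             filtered_obstacles["min_e"] = coordinates
--
-- def choose_vertical_obstacle_closest_to_queen(coordinates, r_q, c_q, filtered_obstacles):
--     if coordinates[0] < r_q:
--         try:
--             if filtered_obstacles["min_n"][0] < coordinates[0]: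
--                 filtered_obstacles["min_n"] = coordinates
--         except KeyError:
--             filtered_obstacles["min_n"] = coordinates
--     elif coordinates[0] > r_q:
--         try:
--             if filtered_obstacles["min_s"][0] > coordinates[0]:
--                 filtered_obstacles["min_s"] = coordinates
--         except KeyError:
--             filtered_obstacles["min_s"] = coordinates
--
-- def choose_diagonal_obstacle_closest_to_queen(coordinates, r_q, c_q, filtered_obstacles):
--     if coordinates[0] < r_q and coordinates[1] < c_q:
--         # nw
--         try:
--             if (r_q - coordinates[0]) < (r_q - filtered_obstacles["min_nw"][0]) \
--                     and (c_q - coordinates[1]) < (c_q - filtered_obstacles["min_nw"][1]):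
--                 filtered_obstacles["min_nw"] = coordinates
--         except KeyError:
--             filtered_obstacles["min_nw"] = coordinates
--     elif coordinates[0] < r_q and coordinates[1] > c_q:
--         # ne
--         try:
--             if (r_q - coordinates[0]) < (r_q - filtered_obstacles["min_ne"][0]) \
--                     and (coordinates[1] - c_q) < (filtered_obstacles["min_ne"][1] - c_q):
--                 filtered_obstacles["min_ne"] = coordinates
--         except KeyError:
--             filtered_obstacles["min_ne"] = coordinates
--     elif coordinates[0] > r_q and coordinates[1] < c_q:
--         # sw
--         try:
--             if (coordinates[0] - r_q) < (filtered_obstacles["min_sw"][0] - r_q) \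
--                     and (c_q - coordinates[1]) < (c_q - filtered_obstacles["min_sw"][1]):
--                 filtered_obstacles["min_sw"] = coordinates
--         except KeyError:
--             filtered_obstacles["min_sw"] = coordinates
--     elif coordinates[0] > r_q and coordinates[1] > c_q:
--         # se
--         try:
--             if (coordinates[0] - r_q) < (filtered_obstacles["min_se"][0] - r_q) \
--                     and (coordinates[1] - c_q) < (filtered_obstacles["min_se"][1] - c_q):
--                 filtered_obstacles["min_se"] = coordinates
--         except KeyError:
--             filtered_obstacles["min_se"] = coordinates
-- ===== SOURCE B (Python) =====
-- def _direction(o, r_q, c_q):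
--     '''Attack-direction key for an obstacle, or None if it is off every path.'''
--     if o[0] == r_q:
--         if o[1] < c_q:
--             return "min_w"
--         if o[1] > c_q:
--             return "min_e"
--         return None
--     if o[1] == c_q:
--         return "min_n" if o[0] < r_q else "min_s"
--     if abs(o[0] - r_q) == abs(o[1] - c_q):
--         if o[0] < r_q:
--             return "min_nw" if o[1] < c_q else "min_ne"
--         return "min_sw" if o[1] < c_q else "min_se"
--     return None
--
-- def cleanup_obstacles(r_q, c_q, obstacles):
--     '''Bucket obstacles by attack direction, then keep the one closest to the queen per bucket.'''
--     keys = []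
--     buckets = {}
--     for o in obstacles:
--         k = _direction(o, r_q, c_q)
--         if k is not None:
--             if k not in buckets:
--                 keys.append(k)
--             buckets[k] = buckets.get(k, []) + [o]
--     return {k: min(buckets[k], key=lambda o: abs(o[0] - r_q) + abs(o[1] - c_q)) for k in keys}
-- ===== Notes on version B (the rewrite author's own statement) =====
-- stated objective: alternative
-- what changed: Replaces the interleaved per-direction conditional dict updates (four helper mutators with try/except) by a two-phase pass: classify each obstacle into an ordered direction bucket, then pick each bucket's minimum by distance with min(key=...).
import Mathlib
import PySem

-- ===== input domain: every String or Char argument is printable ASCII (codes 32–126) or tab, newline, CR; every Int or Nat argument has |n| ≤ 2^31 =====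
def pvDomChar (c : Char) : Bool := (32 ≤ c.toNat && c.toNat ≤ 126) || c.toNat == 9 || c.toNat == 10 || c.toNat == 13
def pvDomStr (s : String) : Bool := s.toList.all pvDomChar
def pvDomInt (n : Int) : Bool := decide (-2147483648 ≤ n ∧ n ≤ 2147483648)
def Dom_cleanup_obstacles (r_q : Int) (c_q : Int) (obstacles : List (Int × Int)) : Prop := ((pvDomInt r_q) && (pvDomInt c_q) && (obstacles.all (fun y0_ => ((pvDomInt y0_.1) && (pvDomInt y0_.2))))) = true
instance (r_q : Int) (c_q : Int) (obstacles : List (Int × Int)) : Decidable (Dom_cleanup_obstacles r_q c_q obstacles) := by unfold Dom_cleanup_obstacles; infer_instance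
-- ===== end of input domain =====

-- B replaces A's interleaved per-direction conditional dict updates by a two-phase
-- bucket-by-direction-then-minimum pass; same O(n) cost, different decomposition.


-- ===== PORT A =====
def pvIsHoriz (coordinates : Int × Int) (r_q : Int) : Bool := coordinates.1 == r_q

def pvIsVert (coordinates : Int × Int) (c_q : Int) : Bool := coordinates.2 == c_q

def pvIsDiag (coordinates : Int × Int) (r_q : Int) (c_q : Int) : Bool :=
  (coordinates.1 - r_q).natAbs == (coordinates.2 - c_q).natAbs

def pvChooseH (c : Int × Int) (r_q : Int) (c_q : Int)
    (d : PySem.Dict String (Int × Int)) : PySem.Dict String (Int × Int) :=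
  if c.2 < c_q then
    match d.get? "min_w" with          -- try/except KeyError
    | some m => if m.2 < c.2 then d.insert "min_w" c else d
    | none => d.insert "min_w" c
  else if c.2 > c_q then
    match d.get? "min_e" with
    | some m => if m.2 > c.2 then d.insert "min_e" c else d
    | none => d.insert "min_e" c
  else d

def pvChooseV (c : Int × Int) (r_q : Int) (c_q : Int)
    (d : PySem.Dict String (Int × Int)) : PySem.Dict String (Int × Int) :=
  if c.1 < r_q then
    match d.get? "min_n" with
    | some m => if m.1 < c.1 then d.insert "min_n" c else d
    | none => d.insert "min_n" c
  else if c.1 > r_q then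
    match d.get? "min_s" with
    | some m => if m.1 > c.1 then d.insert "min_s" c else d
    | none => d.insert "min_s" c
  else d

def pvChooseD (c : Int × Int) (r_q : Int) (c_q : Int)
    (d : PySem.Dict String (Int × Int)) : PySem.Dict String (Int × Int) :=
  if c.1 < r_q ∧ c.2 < c_q then
    match d.get? "min_nw" with
    | some m => if r_q - c.1 < r_q - m.1 ∧ c_q - c.2 < c_q - m.2 then d.insert "min_nw" c else d
    | none => d.insert "min_nw" c
  else if c.1 < r_q ∧ c.2 > c_q then
    match d.get? "min_ne" with
    | some m => if r_q - c.1 < r_q - m.1 ∧ c.2 - c_q < m.2 - c_q then d.insert "min_ne" c else d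
    | none => d.insert "min_ne" c
  else if c.1 > r_q ∧ c.2 < c_q then
    match d.get? "min_sw" with
    | some m => if c.1 - r_q < m.1 - r_q ∧ c_q - c.2 < c_q - m.2 then d.insert "min_sw" c else d
    | none => d.insert "min_sw" c
  else if c.1 > r_q ∧ c.2 > c_q then
    match d.get? "min_se" with
    | some m => if c.1 - r_q < m.1 - r_q ∧ c.2 - c_q < m.2 - c_q then d.insert "min_se" c else d
    | none => d.insert "min_se" c
  else d

def cleanup_obstacles (r_q : Int) (c_q : Int) (obstacles : List (Int × Int)) : List (String × Int × Int) :=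
  (obstacles.foldl
    (fun d c =>
      if pvIsHoriz c r_q then pvChooseH c r_q c_q d
      else if pvIsVert c c_q then pvChooseV c r_q c_q d
      else if pvIsDiag c r_q c_q then pvChooseD c r_q c_q d
      else d)
    PySem.Dict.empty).items

-- ===== PORT B =====
def pvDirection (o : Int × Int) (r_q : Int) (c_q : Int) : Option String :=
  if o.1 == r_q then
    if o.2 < c_q then some "min_w" else if o.2 > c_q then some "min_e" else none
  else if o.2 == c_q then
    if o.1 < r_q then some "min_n" else some "min_s"
  else if (o.1 - r_q).natAbs == (o.2 - c_q).natAbs then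
    if o.1 < r_q then (if o.2 < c_q then some "min_nw" else some "min_ne")
    else (if o.2 < c_q then some "min_sw" else some "min_se")
  else none

def pvDist (r_q : Int) (c_q : Int) (o : Int × Int) : Nat :=
  (o.1 - r_q).natAbs + (o.2 - c_q).natAbs

def cleanup_obstacles_alt (r_q : Int) (c_q : Int) (obstacles : List (Int × Int)) : List (String × Int × Int) :=
  let st := obstacles.foldl
    (fun (s : List String × PySem.Dict String (List (Int × Int))) o =>
      match pvDirection o r_q c_q with
      | none => s
      | some k =>
        (if s.2.contains k then s.1 else s.1 ++ [k],
         s.2.insert k (s.2.getD k [] ++ [o])))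
    ([], PySem.Dict.empty)
  st.1.map (fun k => (k, (PySem.List.min? (st.2.getD k []) (pvDist r_q c_q)).getD (0, 0)))

-- ===== PRECONDITION & SPEC =====
def Spec_cleanup_obstacles (r_q : Int) (c_q : Int) (obstacles : List (Int × Int)) (out : List (String × Int × Int)) : Prop := out = cleanup_obstacles_alt r_q c_q obstacles
instance (r_q : Int) (c_q : Int) (obstacles : List (Int × Int)) (out : List (String × Int × Int)) : Decidable (Spec_cleanup_obstacles r_q c_q obstacles out) := by unfold Spec_cleanup_obstacles; infer_instance

-- ===== CLAIM (what is proved, stated in full; the proofs are below) =====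
def Claim_equal_cleanup_obstacles : Prop := ∀ (r_q : Int) (c_q : Int) (obstacles : List (Int × Int)), Dom_cleanup_obstacles r_q c_q obstacles → Spec_cleanup_obstacles r_q c_q obstacles (cleanup_obstacles r_q c_q obstacles)

-- ===== LEMMAS AND PROOFS =====

-- A's loop body / B's loop body, named for the proofs (definitionally the lambdas in the ports).
def pvStepA (r_q : Int) (c_q : Int) (d : PySem.Dict String (Int × Int)) (c : Int × Int) :
    PySem.Dict String (Int × Int) :=
  if pvIsHoriz c r_q then pvChooseH c r_q c_q d
  else if pvIsVert c c_q then pvChooseV c r_q c_q d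
  else if pvIsDiag c r_q c_q then pvChooseD c r_q c_q d
  else d

def pvStepB (r_q : Int) (c_q : Int) (s : List String × PySem.Dict String (List (Int × Int)))
    (o : Int × Int) : List String × PySem.Dict String (List (Int × Int)) :=
  match pvDirection o r_q c_q with
  | none => s
  | some k =>
    (if s.2.contains k then s.1 else s.1 ++ [k],
     s.2.insert k (s.2.getD k [] ++ [o]))

def pvBest (r_q : Int) (c_q : Int) (xs : List (Int × Int)) : Int × Int :=
  (PySem.List.min? xs (pvDist r_q c_q)).getD (0, 0)

lemma cleanup_eq_foldA (r_q c_q : Int) (l : List (Int × Int)) :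
    cleanup_obstacles r_q c_q l = (l.foldl (pvStepA r_q c_q) PySem.Dict.empty).items := rfl

lemma alt_eq_foldB (r_q c_q : Int) (l : List (Int × Int)) :
    cleanup_obstacles_alt r_q c_q l =
      (l.foldl (pvStepB r_q c_q) ([], PySem.Dict.empty)).1.map
        (fun k => (k, pvBest r_q c_q ((l.foldl (pvStepB r_q c_q) ([], PySem.Dict.empty)).2.getD k []))) := rfl

lemma get?_mk_map (ks : List String) (f : String → Int × Int) (k : String) :
    (PySem.Dict.mk (ks.map (fun k' => (k', f k')))).get? k
      = if k ∈ ks then some (f k) else none := by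
  induction ks with
  | nil => simp [PySem.Dict.get?]
  | cons a t ih =>
    simp only [List.map_cons, PySem.Dict.get?] at ih ⊢
    by_cases h : a = k
    · subst h
      simp
    · have hne : ((k, f k).1 == k) = true := by simp
      simp only [List.find?_cons, show ((a, f a).1 == k) = false by simp [h]]
      rw [ih]
      simp [List.mem_cons, show ¬k = a from fun hk => h hk.symm]

lemma contains_mk_map (ks : List String) (f : String → Int × Int) (k : String) :
    (PySem.Dict.mk (ks.map (fun k' => (k', f k')))).contains k = decide (k ∈ ks) := by
  induction ks with
  | nil => simp [PySem.Dict.contains]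
  | cons a t ih =>
    simp only [List.map_cons, PySem.Dict.contains, List.any_cons] at ih ⊢
    by_cases h : a = k
    · simp [h, ih]
    · simp [h, ih, show ¬k = a from fun hk => h hk.symm]

lemma insert_mk_map_mem (ks : List String) (f : String → Int × Int) (k : String) (v : Int × Int)
    (hk : k ∈ ks) :
    (PySem.Dict.mk (ks.map (fun k' => (k', f k')))).insert k v
      = PySem.Dict.mk (ks.map (fun k' => (k', if k' = k then v else f k'))) := by
  rw [PySem.Dict.insert, if_pos (by rw [contains_mk_map]; exact decide_eq_true hk)]
  congr 1
  rw [List.map_map]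
  apply List.map_congr_left
  intro a _
  by_cases h : a = k <;> simp [h]

lemma insert_mk_map_notmem (ks : List String) (f : String → Int × Int) (k : String) (v : Int × Int)
    (hk : k ∉ ks) :
    (PySem.Dict.mk (ks.map (fun k' => (k', f k')))).insert k v
      = PySem.Dict.mk (ks.map (fun k' => (k', f k')) ++ [(k, v)]) := by
  rw [PySem.Dict.insert, if_neg (by rw [contains_mk_map]; simp [hk])]

-- per-direction reductions of A's loop body
lemma stepA_w (r_q c_q : Int) (d : PySem.Dict String (Int × Int)) (o : Int × Int)
    (h1 : o.1 = r_q) (h2 : o.2 < c_q) :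
    pvStepA r_q c_q d o =
      (match d.get? "min_w" with
       | some m => if m.2 < o.2 then d.insert "min_w" o else d
       | none => d.insert "min_w" o) := by
  simp [pvStepA, pvIsHoriz, pvChooseH, h1, h2]

lemma stepA_e (r_q c_q : Int) (d : PySem.Dict String (Int × Int)) (o : Int × Int)
    (h1 : o.1 = r_q) (h2 : c_q < o.2) :
    pvStepA r_q c_q d o =
      (match d.get? "min_e" with
       | some m => if m.2 > o.2 then d.insert "min_e" o else d
       | none => d.insert "min_e" o) := by
  have h2' : ¬ o.2 < c_q := by omega
  simp [pvStepA, pvIsHoriz, pvChooseH, h1, h2, h2']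

lemma stepA_n (r_q c_q : Int) (d : PySem.Dict String (Int × Int)) (o : Int × Int)
    (h1 : o.1 < r_q) (h2 : o.2 = c_q) :
    pvStepA r_q c_q d o =
      (match d.get? "min_n" with
       | some m => if m.1 < o.1 then d.insert "min_n" o else d
       | none => d.insert "min_n" o) := by
  have h1' : ¬ o.1 = r_q := by omega
  simp [pvStepA, pvIsHoriz, pvIsVert, pvChooseV, h1, h1', h2]

lemma stepA_s (r_q c_q : Int) (d : PySem.Dict String (Int × Int)) (o : Int × Int)
    (h1 : r_q < o.1) (h2 : o.2 = c_q) :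
    pvStepA r_q c_q d o =
      (match d.get? "min_s" with
       | some m => if m.1 > o.1 then d.insert "min_s" o else d
       | none => d.insert "min_s" o) := by
  have h1' : ¬ o.1 = r_q := by omega
  have h1'' : ¬ o.1 < r_q := by omega
  simp [pvStepA, pvIsHoriz, pvIsVert, pvChooseV, h1, h1', h1'', h2]

lemma stepA_nw (r_q c_q : Int) (d : PySem.Dict String (Int × Int)) (o : Int × Int)
    (h1 : o.1 < r_q) (h2 : o.2 < c_q) (hd : (o.1 - r_q).natAbs = (o.2 - c_q).natAbs) :
    pvStepA r_q c_q d o =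
      (match d.get? "min_nw" with
       | some m => if r_q - o.1 < r_q - m.1 ∧ c_q - o.2 < c_q - m.2 then d.insert "min_nw" o else d
       | none => d.insert "min_nw" o) := by
  have h1' : ¬ o.1 = r_q := by omega
  have h2' : ¬ o.2 = c_q := by omega
  simp [pvStepA, pvIsHoriz, pvIsVert, pvIsDiag, pvChooseD, h1, h1', h2, h2', hd]

lemma stepA_ne (r_q c_q : Int) (d : PySem.Dict String (Int × Int)) (o : Int × Int)
    (h1 : o.1 < r_q) (h2 : c_q < o.2) (hd : (o.1 - r_q).natAbs = (o.2 - c_q).natAbs) :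
    pvStepA r_q c_q d o =
      (match d.get? "min_ne" with
       | some m => if r_q - o.1 < r_q - m.1 ∧ o.2 - c_q < m.2 - c_q then d.insert "min_ne" o else d
       | none => d.insert "min_ne" o) := by
  have h1' : ¬ o.1 = r_q := by omega
  have h2' : ¬ o.2 = c_q := by omega
  have h2'' : ¬ o.2 < c_q := by omega
  simp [pvStepA, pvIsHoriz, pvIsVert, pvIsDiag, pvChooseD, h1, h1', h2, h2', h2'', hd]

lemma stepA_sw (r_q c_q : Int) (d : PySem.Dict String (Int × Int)) (o : Int × Int)
    (h1 : r_q < o.1) (h2 : o.2 < c_q) (hd : (o.1 - r_q).natAbs = (o.2 - c_q).natAbs) :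
    pvStepA r_q c_q d o =
      (match d.get? "min_sw" with
       | some m => if o.1 - r_q < m.1 - r_q ∧ c_q - o.2 < c_q - m.2 then d.insert "min_sw" o else d
       | none => d.insert "min_sw" o) := by
  have h1' : ¬ o.1 = r_q := by omega
  have h1'' : ¬ o.1 < r_q := by omega
  have h2' : ¬ o.2 = c_q := by omega
  simp [pvStepA, pvIsHoriz, pvIsVert, pvIsDiag, pvChooseD, h1, h1', h1'', h2, h2', hd]

lemma stepA_se (r_q c_q : Int) (d : PySem.Dict String (Int × Int)) (o : Int × Int)
    (h1 : r_q < o.1) (h2 : c_q < o.2) (hd : (o.1 - r_q).natAbs = (o.2 - c_q).natAbs) :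
    pvStepA r_q c_q d o =
      (match d.get? "min_se" with
       | some m => if o.1 - r_q < m.1 - r_q ∧ o.2 - c_q < m.2 - c_q then d.insert "min_se" o else d
       | none => d.insert "min_se" o) := by
  have h1' : ¬ o.1 = r_q := by omega
  have h1'' : ¬ o.1 < r_q := by omega
  have h2' : ¬ o.2 = c_q := by omega
  have h2'' : ¬ o.2 < c_q := by omega
  simp [pvStepA, pvIsHoriz, pvIsVert, pvIsDiag, pvChooseD, h1, h1', h1'', h2, h2', h2'', hd]

-- inversion of B's classifier
lemma dir_cases (r_q c_q : Int) (o : Int × Int) (k : String)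
    (h : pvDirection o r_q c_q = some k) :
    k = "min_w" ∨ k = "min_e" ∨ k = "min_n" ∨ k = "min_s" ∨
    k = "min_nw" ∨ k = "min_ne" ∨ k = "min_sw" ∨ k = "min_se" := by
  unfold pvDirection at h
  split_ifs at h <;>
    first
      | exact Option.noConfusion h
      | (injection h with h; subst h; simp)

lemma dir_w_inv (r_q c_q : Int) (o : Int × Int)
    (h : pvDirection o r_q c_q = some "min_w") : o.1 = r_q ∧ o.2 < c_q := by
  unfold pvDirection at h
  split_ifs at h <;> simp_all

lemma dir_e_inv (r_q c_q : Int) (o : Int × Int)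
    (h : pvDirection o r_q c_q = some "min_e") : o.1 = r_q ∧ c_q < o.2 := by
  unfold pvDirection at h
  split_ifs at h <;> simp_all

lemma dir_n_inv (r_q c_q : Int) (o : Int × Int)
    (h : pvDirection o r_q c_q = some "min_n") : o.1 < r_q ∧ o.2 = c_q := by
  unfold pvDirection at h
  split_ifs at h <;> simp_all

lemma dir_s_inv (r_q c_q : Int) (o : Int × Int)
    (h : pvDirection o r_q c_q = some "min_s") : r_q < o.1 ∧ o.2 = c_q := by
  unfold pvDirection at h
  split_ifs at h <;> simp_all <;> omega

lemma dir_nw_inv (r_q c_q : Int) (o : Int × Int)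
    (h : pvDirection o r_q c_q = some "min_nw") :
    o.1 < r_q ∧ o.2 < c_q ∧ (o.1 - r_q).natAbs = (o.2 - c_q).natAbs := by
  unfold pvDirection at h
  split_ifs at h <;> simp_all

lemma dir_ne_inv (r_q c_q : Int) (o : Int × Int)
    (h : pvDirection o r_q c_q = some "min_ne") :
    o.1 < r_q ∧ c_q < o.2 ∧ (o.1 - r_q).natAbs = (o.2 - c_q).natAbs := by
  unfold pvDirection at h
  split_ifs at h <;> simp_all <;> omega

lemma dir_sw_inv (r_q c_q : Int) (o : Int × Int)
    (h : pvDirection o r_q c_q = some "min_sw") :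
    r_q < o.1 ∧ o.2 < c_q ∧ (o.1 - r_q).natAbs = (o.2 - c_q).natAbs := by
  unfold pvDirection at h
  split_ifs at h <;> simp_all <;> omega

lemma dir_se_inv (r_q c_q : Int) (o : Int × Int)
    (h : pvDirection o r_q c_q = some "min_se") :
    r_q < o.1 ∧ c_q < o.2 ∧ (o.1 - r_q).natAbs = (o.2 - c_q).natAbs := by
  unfold pvDirection at h
  split_ifs at h <;> simp_all <;> omega

lemma stepA_none (r_q c_q : Int) (d : PySem.Dict String (Int × Int)) (o : Int × Int)
    (h : pvDirection o r_q c_q = none) : pvStepA r_q c_q d o = d := by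
  by_cases hH : o.1 = r_q
  · have h2 : ¬ o.2 < c_q ∧ ¬ o.2 > c_q := by
      unfold pvDirection at h
      rw [if_pos (by simp [hH])] at h
      split_ifs at h with a b
      exact ⟨a, b⟩
    simp [pvStepA, pvIsHoriz, pvChooseH, hH, h2.1, h2.2]
  · by_cases hV : o.2 = c_q
    · exfalso
      unfold pvDirection at h
      rw [if_neg (by simp [hH]), if_pos (by simp [hV])] at h
      split_ifs at h
    · by_cases hD : (o.1 - r_q).natAbs = (o.2 - c_q).natAbs
      · exfalso
        unfold pvDirection at h
        rw [if_neg (by simp [hH]), if_neg (by simp [hV]), if_pos (by simp [hD])] at h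
        split_ifs at h
      · simp [pvStepA, pvIsHoriz, pvIsVert, pvIsDiag, hH, hV, hD]

lemma stepA_some_none (r_q c_q : Int) (d : PySem.Dict String (Int × Int)) (o : Int × Int)
    (k : String) (h : pvDirection o r_q c_q = some k) (hg : d.get? k = none) :
    pvStepA r_q c_q d o = d.insert k o := by
  rcases dir_cases r_q c_q o k h with rfl | rfl | rfl | rfl | rfl | rfl | rfl | rfl
  · obtain ⟨h1, h2⟩ := dir_w_inv r_q c_q o h
    rw [stepA_w r_q c_q d o h1 h2, hg]
  · obtain ⟨h1, h2⟩ := dir_e_inv r_q c_q o h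
    rw [stepA_e r_q c_q d o h1 h2, hg]
  · obtain ⟨h1, h2⟩ := dir_n_inv r_q c_q o h
    rw [stepA_n r_q c_q d o h1 h2, hg]
  · obtain ⟨h1, h2⟩ := dir_s_inv r_q c_q o h
    rw [stepA_s r_q c_q d o h1 h2, hg]
  · obtain ⟨h1, h2, hd⟩ := dir_nw_inv r_q c_q o h
    rw [stepA_nw r_q c_q d o h1 h2 hd, hg]
  · obtain ⟨h1, h2, hd⟩ := dir_ne_inv r_q c_q o h
    rw [stepA_ne r_q c_q d o h1 h2 hd, hg]
  · obtain ⟨h1, h2, hd⟩ := dir_sw_inv r_q c_q o h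
    rw [stepA_sw r_q c_q d o h1 h2 hd, hg]
  · obtain ⟨h1, h2, hd⟩ := dir_se_inv r_q c_q o h
    rw [stepA_se r_q c_q d o h1 h2 hd, hg]

lemma stepA_some_some (r_q c_q : Int) (d : PySem.Dict String (Int × Int)) (o m : Int × Int)
    (k : String) (h : pvDirection o r_q c_q = some k) (hg : d.get? k = some m)
    (hm : pvDirection m r_q c_q = some k) :
    pvStepA r_q c_q d o =
      if pvDist r_q c_q o < pvDist r_q c_q m then d.insert k o else d := by
  rcases dir_cases r_q c_q o k h with rfl | rfl | rfl | rfl | rfl | rfl | rfl | rfl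
  · obtain ⟨h1, h2⟩ := dir_w_inv r_q c_q o h
    obtain ⟨g1, g2⟩ := dir_w_inv r_q c_q m hm
    rw [stepA_w r_q c_q d o h1 h2, hg]
    show (if m.2 < o.2 then d.insert "min_w" o else d) = _
    exact if_congr (by simp only [pvDist]; omega) rfl rfl
  · obtain ⟨h1, h2⟩ := dir_e_inv r_q c_q o h
    obtain ⟨g1, g2⟩ := dir_e_inv r_q c_q m hm
    rw [stepA_e r_q c_q d o h1 h2, hg]
    show (if m.2 > o.2 then d.insert "min_e" o else d) = _
    exact if_congr (by simp only [pvDist]; omega) rfl rfl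
  · obtain ⟨h1, h2⟩ := dir_n_inv r_q c_q o h
    obtain ⟨g1, g2⟩ := dir_n_inv r_q c_q m hm
    rw [stepA_n r_q c_q d o h1 h2, hg]
    show (if m.1 < o.1 then d.insert "min_n" o else d) = _
    exact if_congr (by simp only [pvDist]; omega) rfl rfl
  · obtain ⟨h1, h2⟩ := dir_s_inv r_q c_q o h
    obtain ⟨g1, g2⟩ := dir_s_inv r_q c_q m hm
    rw [stepA_s r_q c_q d o h1 h2, hg]
    show (if m.1 > o.1 then d.insert "min_s" o else d) = _
    exact if_congr (by simp only [pvDist]; omega) rfl rfl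
  · obtain ⟨h1, h2, hd⟩ := dir_nw_inv r_q c_q o h
    obtain ⟨g1, g2, gd⟩ := dir_nw_inv r_q c_q m hm
    rw [stepA_nw r_q c_q d o h1 h2 hd, hg]
    show (if r_q - o.1 < r_q - m.1 ∧ c_q - o.2 < c_q - m.2 then d.insert "min_nw" o else d) = _
    exact if_congr (by simp only [pvDist]; omega) rfl rfl
  · obtain ⟨h1, h2, hd⟩ := dir_ne_inv r_q c_q o h
    obtain ⟨g1, g2, gd⟩ := dir_ne_inv r_q c_q m hm
    rw [stepA_ne r_q c_q d o h1 h2 hd, hg]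
    show (if r_q - o.1 < r_q - m.1 ∧ o.2 - c_q < m.2 - c_q then d.insert "min_ne" o else d) = _
    exact if_congr (by simp only [pvDist]; omega) rfl rfl
  · obtain ⟨h1, h2, hd⟩ := dir_sw_inv r_q c_q o h
    obtain ⟨g1, g2, gd⟩ := dir_sw_inv r_q c_q m hm
    rw [stepA_sw r_q c_q d o h1 h2 hd, hg]
    show (if o.1 - r_q < m.1 - r_q ∧ c_q - o.2 < c_q - m.2 then d.insert "min_sw" o else d) = _
    exact if_congr (by simp only [pvDist]; omega) rfl rfl
  · obtain ⟨h1, h2, hd⟩ := dir_se_inv r_q c_q o h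
    obtain ⟨g1, g2, gd⟩ := dir_se_inv r_q c_q m hm
    rw [stepA_se r_q c_q d o h1 h2 hd, hg]
    show (if o.1 - r_q < m.1 - r_q ∧ o.2 - c_q < m.2 - c_q then d.insert "min_se" o else d) = _
    exact if_congr (by simp only [pvDist]; omega) rfl rfl

lemma min?_append_singleton (xs : List (Int × Int)) (o m : Int × Int)
    (key : (Int × Int) → Nat)
    (h : PySem.List.min? xs key = some m) :
    PySem.List.min? (xs ++ [o]) key
      = some (if key o < key m then o else m) := by
  unfold PySem.List.min? at h ⊢
  rw [List.foldl_append, h]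
  simp only [List.foldl_cons, List.foldl_nil]
  split_ifs <;> rfl

lemma getD_of_not_contains (b : PySem.Dict String (List (Int × Int))) (k : String)
    (h : b.contains k = false) : b.getD k [] = [] := by
  unfold PySem.Dict.getD
  rw [(PySem.Dict.get?_eq_none_iff_contains b k).mpr h]
  rfl

set_option maxHeartbeats 1000000 in
lemma pvMain (r_q c_q : Int) (l : List (Int × Int)) (ks : List String)
    (b : PySem.Dict String (List (Int × Int)))
    (hcont : ∀ k, b.contains k = true ↔ k ∈ ks)
    (hne : ∀ k ∈ ks, b.getD k [] ≠ [])
    (hcl : ∀ k o, o ∈ b.getD k [] → pvDirection o r_q c_q = some k) :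
    l.foldl (pvStepA r_q c_q) (PySem.Dict.mk (ks.map (fun k => (k, pvBest r_q c_q (b.getD k [])))))
      = PySem.Dict.mk ((l.foldl (pvStepB r_q c_q) (ks, b)).1.map
          (fun k => (k, pvBest r_q c_q ((l.foldl (pvStepB r_q c_q) (ks, b)).2.getD k [])))) := by
  induction l generalizing ks b with
  | nil => rfl
  | cons o l ih =>
    rw [List.foldl_cons, List.foldl_cons]
    cases h : pvDirection o r_q c_q with
    | none =>
      rw [stepA_none r_q c_q _ o h]
      have hB : pvStepB r_q c_q (ks, b) o = (ks, b) := by simp [pvStepB, h]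
      rw [hB]
      exact ih ks b hcont hne hcl
    | some k =>
      -- facts about the updated bucket dict, shared by both branches
      have hb' : ∀ k', (b.insert k (b.getD k [] ++ [o])).getD k' []
          = if k' = k then b.getD k [] ++ [o] else b.getD k' [] := by
        intro k'
        by_cases hkk : k' = k
        · subst hkk; simp [PySem.Dict.getD_insert_self]
        · rw [if_neg hkk, PySem.Dict.getD_insert_of_ne _ _ _ hkk]
      have hcl' : ∀ k' o', o' ∈ (b.insert k (b.getD k [] ++ [o])).getD k' []
          → pvDirection o' r_q c_q = some k' := by
        intro k' o' ho'
        rw [hb' k'] at ho'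
        split_ifs at ho' with hkk
        · rcases List.mem_append.mp ho' with h1 | h1
          · rw [hkk]; exact hcl k o' h1
          · rw [List.mem_singleton.mp h1, hkk]; exact h
        · exact hcl k' o' ho'
      by_cases hk : k ∈ ks
      · -- existing bucket
        have hcb : b.contains k = true := (hcont k).mpr hk
        have hB : pvStepB r_q c_q (ks, b) o = (ks, b.insert k (b.getD k [] ++ [o])) := by
          simp [pvStepB, h, hcb]
        rw [hB]
        have hxs : b.getD k [] ≠ [] := hne k hk
        obtain ⟨m, hm⟩ : ∃ m, PySem.List.min? (b.getD k []) (pvDist r_q c_q) = some m := by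
          cases hmin : PySem.List.min? (b.getD k []) (pvDist r_q c_q) with
          | none => exact absurd ((PySem.List.min?_eq_none_iff _ _).mp hmin) hxs
          | some m => exact ⟨m, rfl⟩
        have hbm : pvBest r_q c_q (b.getD k []) = m := by simp [pvBest, hm]
        have hdm : pvDirection m r_q c_q = some k := hcl k m (PySem.List.min?_mem hm)
        have hget : (PySem.Dict.mk (ks.map (fun k' => (k', pvBest r_q c_q (b.getD k' []))))).get? k
            = some m := by rw [get?_mk_map, if_pos hk, hbm]
        rw [stepA_some_some r_q c_q _ o m k h hget hdm]
        have hcont' : ∀ k', (b.insert k (b.getD k [] ++ [o])).contains k' = true ↔ k' ∈ ks := by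
          intro k'
          rw [PySem.Dict.contains_insert]
          by_cases hkk : k' = k
          · subst hkk; simp [hk]
          · simp [hkk, hcont k']
        have hne' : ∀ k' ∈ ks, (b.insert k (b.getD k [] ++ [o])).getD k' [] ≠ [] := by
          intro k' hk'
          rw [hb' k']
          split_ifs with hkk
          · simp
          · exact hne k' hk'
        have hbest' : ∀ k' ∈ ks,
            pvBest r_q c_q ((b.insert k (b.getD k [] ++ [o])).getD k' [])
              = if k' = k then (if pvDist r_q c_q o < pvDist r_q c_q m then o else m)
                else pvBest r_q c_q (b.getD k' []) := by
          intro k' _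
          rw [hb' k']
          by_cases hkk : k' = k
          · subst hkk
            rw [if_pos rfl, if_pos rfl]
            unfold pvBest
            rw [min?_append_singleton _ o m _ hm]
            split_ifs <;> rfl
          · rw [if_neg hkk, if_neg hkk]
        have hIH := ih ks (b.insert k (b.getD k [] ++ [o])) hcont' hne' hcl'
        by_cases hlt : pvDist r_q c_q o < pvDist r_q c_q m
        · rw [if_pos hlt]
          rw [insert_mk_map_mem ks _ k o hk]
          have hinit : (ks.map (fun k' => (k', if k' = k then o else pvBest r_q c_q (b.getD k' []))))
              = ks.map (fun k' => (k', pvBest r_q c_q ((b.insert k (b.getD k [] ++ [o])).getD k' []))) := by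
            apply List.map_congr_left
            intro a ha
            rw [hbest' a ha]
            by_cases hak : a = k
            · simp [hak, hlt]
            · simp [hak]
          rw [hinit]
          exact hIH
        · rw [if_neg hlt]
          have hinit : (ks.map (fun k' => (k', pvBest r_q c_q (b.getD k' []))))
              = ks.map (fun k' => (k', pvBest r_q c_q ((b.insert k (b.getD k [] ++ [o])).getD k' []))) := by
            apply List.map_congr_left
            intro a ha
            rw [hbest' a ha]
            by_cases hak : a = k
            · simp [hak, hlt, hbm]
            · simp [hak]
          rw [hinit]
          exact hIH
      · -- new bucket
        have hcb : b.contains k = false := by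
          cases hc : b.contains k
          · rfl
          · exact absurd ((hcont k).mp hc) hk
        have hB : pvStepB r_q c_q (ks, b) o = (ks ++ [k], b.insert k (b.getD k [] ++ [o])) := by
          simp [pvStepB, h, hcb]
        rw [hB]
        have hgd : b.getD k [] = [] := getD_of_not_contains b k hcb
        have hget : (PySem.Dict.mk (ks.map (fun k' => (k', pvBest r_q c_q (b.getD k' []))))).get? k
            = none := by rw [get?_mk_map, if_neg hk]
        rw [stepA_some_none r_q c_q _ o k h hget]
        rw [insert_mk_map_notmem ks _ k o hk]
        have hcont' : ∀ k', (b.insert k (b.getD k [] ++ [o])).contains k' = true ↔ k' ∈ ks ++ [k] := by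
          intro k'
          rw [PySem.Dict.contains_insert]
          by_cases hkk : k' = k
          · subst hkk; simp
          · simp [hkk, hcont k']
        have hne' : ∀ k' ∈ ks ++ [k], (b.insert k (b.getD k [] ++ [o])).getD k' [] ≠ [] := by
          intro k' hk'
          rw [hb' k']
          split_ifs with hkk
          · simp
          · refine hne k' ?_
            rcases List.mem_append.mp hk' with h1 | h1
            · exact h1
            · exact absurd (List.mem_singleton.mp h1) hkk
        have hIH := ih (ks ++ [k]) (b.insert k (b.getD k [] ++ [o])) hcont' hne' hcl'
        have hinit : ((ks ++ [k]).map (fun k' => (k', pvBest r_q c_q ((b.insert k (b.getD k [] ++ [o])).getD k' []))))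
            = ks.map (fun k' => (k', pvBest r_q c_q (b.getD k' []))) ++ [(k, o)] := by
          rw [List.map_append]
          congr 1
          · apply List.map_congr_left
            intro a ha
            rw [hb' a, if_neg (fun hak : a = k => hk (hak ▸ ha))]
          · simp [hgd, pvBest, PySem.List.min?]
        rw [← hinit]
        exact hIH

-- ===== VERDICT (by name: the statement is the Claim_ definition above) =====
theorem cleanup_obstacles_spec : Claim_equal_cleanup_obstacles := by
  intro r_q c_q obstacles _
  unfold Spec_cleanup_obstacles
  rw [cleanup_eq_foldA, alt_eq_foldB]
  have h := pvMain r_q c_q obstacles [] PySem.Dict.empty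
    (by intro k; simp [PySem.Dict.contains, PySem.Dict.empty])
    (by intro k hk; simp at hk)
    (by intro k o ho; simp [PySem.Dict.getD, PySem.Dict.get?, PySem.Dict.empty] at ho)
  simpa using congrArg PySem.Dict.items h
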